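-- pv_equiv track=rewrite | github.com/homebrew9/leetcode_solutions | algorithms/hard/handshakes_that_dont_cross.py | numberOfWays_2
-- ===== SOURCE A (Python) =====
-- def numberOfWays_2(numPeople: int) -> int:
--     MOD = 10**9 + 7
--     dp = [0] * (numPeople + 1)
--     dp[0] = 1
--     for n in range(2, numPeople + 1, 2):
--         for i in range(1, n, 2):
--             left = i - 1
--             right = n - i - 1
--             dp[n] = (dp[n] + dp[left] * dp[right]) % MOD
--     return dp[numPeople]
-- ===== SOURCE B (Python) =====
-- def numberOfWays_2(numPeople: int) -> int:
--     # Catalan(numPeople//2) via the exact integer recurrence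
--     # C(k) = C(k-1) * 2*(2k-1) // (k+1), one pass, mod taken once at the end.
--     MOD = 10**9 + 7
--     if numPeople % 2:
--         return 0
--     c = 1
--     for k in range(1, numPeople // 2 + 1):
--         c = c * (2 * (2 * k - 1)) // (k + 1)
--     return c % MOD
-- ===== Notes on version B (the rewrite author's own statement) =====
-- stated objective: faster
-- what changed: Replaces the O(n^2) Catalan convolution DP over a dp table by a single O(n) pass that computes catalan(n/2) exactly via the product recurrence C(k) = C(k-1)*2*(2k-1)//(k+1) and takes the modulus once at the end.
-- outside the precondition, e.g. on numberOfWays_2(-3): A raises IndexError, B returns 0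
import Mathlib
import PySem

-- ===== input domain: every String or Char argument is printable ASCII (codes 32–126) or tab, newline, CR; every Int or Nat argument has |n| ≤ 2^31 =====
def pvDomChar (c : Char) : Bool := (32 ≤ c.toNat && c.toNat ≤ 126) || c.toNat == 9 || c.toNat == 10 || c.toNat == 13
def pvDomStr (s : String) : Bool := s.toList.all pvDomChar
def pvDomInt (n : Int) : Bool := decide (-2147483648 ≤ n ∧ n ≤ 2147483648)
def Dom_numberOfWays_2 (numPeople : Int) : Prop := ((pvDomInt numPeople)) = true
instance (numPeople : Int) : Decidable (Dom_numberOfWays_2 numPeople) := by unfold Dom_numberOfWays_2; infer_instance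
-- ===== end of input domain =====

-- B replaces A's O(n^2) convolution DP over a dp table by a single O(n) pass computing the
-- Catalan number through its exact one-step product recurrence, taking the modulus once at the end.

-- ===== PORT A =====
def numberOfWays_2 (numPeople : Int) : Int :=
  let MOD : Int := 10 ^ 9 + 7
  let dp : List Int := List.replicate (numPeople + 1).toNat 0
  -- dp[0] = 1 raises IndexError when dp is empty (numPeople < 0); Pre_ excludes that; pySetD is the total form
  let dp := PySem.List.pySetD dp 0 1
  let dp := (PySem.List.pyRange 2 (numPeople + 1) 2).foldl (fun dp n =>
      (PySem.List.pyRange 1 n 2).foldl (fun dp i =>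
        let left := i - 1
        let right := n - i - 1
        PySem.List.pySetD dp n
          (PySem.Int.mod
            (PySem.List.pyGetD dp n 0 + PySem.List.pyGetD dp left 0 * PySem.List.pyGetD dp right 0)
            MOD))
        dp)
    dp
  PySem.List.pyGetD dp numPeople 0

-- ===== PORT B =====
def numberOfWays_2_alt (numPeople : Int) : Int :=
  let MOD : Int := 10 ^ 9 + 7
  if PySem.Int.mod numPeople 2 ≠ 0 then 0
  else
    let c := (PySem.List.pyRange 1 (PySem.Int.floordiv numPeople 2 + 1) 1).foldl
        (fun c k => PySem.Int.floordiv (c * (2 * (2 * k - 1))) (k + 1)) 1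
    PySem.Int.mod c MOD

-- ===== PRECONDITION & SPEC =====
-- Pre_ excludes numPeople < 0, where A raises IndexError (dp is the empty list before dp[0] = 1).
def Pre_numberOfWays_2 (numPeople : Int) : Prop := 0 ≤ numPeople
instance (numPeople : Int) : Decidable (Pre_numberOfWays_2 numPeople) := by
  unfold Pre_numberOfWays_2; infer_instance
def pvWitness_numberOfWays_2 : Int := 8

def Spec_numberOfWays_2 (numPeople : Int) (out : Int) : Prop := out = numberOfWays_2_alt numPeople
instance (numPeople : Int) (out : Int) : Decidable (Spec_numberOfWays_2 numPeople out) := by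
  unfold Spec_numberOfWays_2; infer_instance

-- ===== CLAIM (what is proved, stated in full; the proofs are below) =====
def Claim_equal_numberOfWays_2 : Prop := ∀ (numPeople : Int), Dom_numberOfWays_2 numPeople → Pre_numberOfWays_2 numPeople → Spec_numberOfWays_2 numPeople (numberOfWays_2 numPeople)

-- ===== LEMMAS AND PROOFS =====

-- the modulus, as a natural number
def pvP : ℕ := 1000000007

-- dp after the outer loop has processed the even indices 2, 4, …, 2*t:
-- even positions j ≤ 2*t hold catalan (j/2) mod pvP, every other position is 0.
def pvD (N t : ℕ) : List Int :=
  (List.range (N + 1)).map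
    (fun j => if j % 2 = 0 ∧ j ≤ 2 * t then ((catalan (j / 2) % pvP : ℕ) : Int) else 0)

lemma pvD_length (N t : ℕ) : (pvD N t).length = N + 1 := by
  simp [pvD]

lemma pvCat_rec (m : ℕ) : (m + 2) * catalan (m + 1) = 2 * (2 * m + 1) * catalan m := by
  have h1 := Nat.succ_mul_centralBinom_succ m
  have h2 := succ_mul_catalan_eq_centralBinom m
  have h3 := succ_mul_catalan_eq_centralBinom (m + 1)
  apply Nat.eq_of_mul_eq_mul_left (show 0 < m + 1 by omega)
  calc (m + 1) * ((m + 2) * catalan (m + 1)) = (m + 1 + 1) * catalan (m + 1) * (m + 1) := by ring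
    _ = (m + 1).centralBinom * (m + 1) := by rw [h3]
    _ = (m + 1) * (m + 1).centralBinom := by ring
    _ = 2 * (2 * m + 1) * m.centralBinom := h1
    _ = 2 * (2 * m + 1) * ((m + 1) * catalan m) := by rw [h2]
    _ = (m + 1) * (2 * (2 * m + 1) * catalan m) := by ring

lemma pvB_loop (m : ℕ) :
    (PySem.List.pyRange 1 ((m : Int) + 1) 1).foldl
      (fun c k => PySem.Int.floordiv (c * (2 * (2 * k - 1))) (k + 1)) 1 = (catalan m : Int) := by
  induction m with
  | zero =>
    rw [show ((0 : ℕ) : Int) + 1 = 1 by norm_num, PySem.List.pyRange_one_eq_nil le_rfl]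
    simp [catalan_zero]
  | succ m ih =>
    rw [show (((m + 1 : ℕ)) : Int) + 1 = ((m : Int) + 1) + 1 by push_cast; ring,
      PySem.List.pyRange_one_succ_right (by omega), List.foldl_append, ih]
    simp only [List.foldl_cons, List.foldl_nil]
    have key : (catalan m : Int) * (2 * (2 * ((m : Int) + 1) - 1)) = ((m : Int) + 2) * (catalan (m + 1) : Int) := by
      have h := congrArg (fun n : ℕ => (n : Int)) (pvCat_rec m)
      push_cast at h ⊢
      linarith [h]
    rw [key, PySem.Int.floordiv_eq_ediv_of_pos (by omega),
      show (m : Int) + 1 + 1 = (m : Int) + 2 by ring,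
      Int.mul_ediv_cancel_left _ (by omega)]

lemma pvModCast : (10 ^ 9 + 7 : Int) = ((pvP : ℕ) : Int) := by
  norm_num [pvP]

lemma pvB_even (m : ℕ) (h : m % 2 = 0) :
    numberOfWays_2_alt (m : Int) = ((catalan (m / 2) % pvP : ℕ) : Int) := by
  simp only [numberOfWays_2_alt]
  have h2 : PySem.Int.mod (m : Int) 2 = ((m % 2 : ℕ) : Int) := by
    exact_mod_cast PySem.Int.mod_natCast m 2
  rw [h2, h]
  norm_num
  rw [show ((m : Int) / 2) = ((m / 2 : ℕ) : Int) by omega, pvB_loop (m / 2)]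
  norm_num [pvP]

lemma pvB_odd (m : ℕ) (h : m % 2 = 1) : numberOfWays_2_alt (m : Int) = 0 := by
  simp only [numberOfWays_2_alt]
  have h2 : PySem.Int.mod (m : Int) 2 = ((m % 2 : ℕ) : Int) := by
    exact_mod_cast PySem.Int.mod_natCast m 2
  rw [h2, h]
  norm_num

lemma pvOuterRange (N : ℕ) :
    PySem.List.pyRange 2 ((N : Int) + 1) 2 = (List.range (N / 2)).map (fun k => ((2 + 2 * k : ℕ) : Int)) := by
  rw [PySem.List.pyRange_of_pos _ _ (by norm_num : (0 : Int) < 2)]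
  have hc : (if (2 : Int) < (N : Int) + 1 then (((N : Int) + 1 - 2 + 2 - 1) / 2).toNat else 0) = N / 2 := by
    split_ifs with h
    · rw [show ((N : Int) + 1 - 2 + 2 - 1) = (N : Int) by ring]
      omega
    · omega
  rw [hc]
  apply List.map_congr_left
  intro k _
  push_cast
  ring

lemma pvInnerRange (t : ℕ) :
    PySem.List.pyRange 1 ((2 + 2 * t : ℕ) : Int) 2 = (List.range (t + 1)).map (fun s => ((1 + 2 * s : ℕ) : Int)) := by
  rw [PySem.List.pyRange_of_pos _ _ (by norm_num : (0 : Int) < 2)]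
  have hc : (if (1 : Int) < ((2 + 2 * t : ℕ) : Int) then ((((2 + 2 * t : ℕ) : Int) - 1 + 2 - 1) / 2).toNat else 0) = t + 1 := by
    rw [if_pos (by push_cast; omega)]
    push_cast
    omega
  rw [hc]
  apply List.map_congr_left
  intro s _
  push_cast
  ring

lemma pvInit (N : ℕ) :
    PySem.List.pySetD (List.replicate ((N : Int) + 1).toNat (0 : Int)) 0 1 = pvD N 0 := by
  have hL : ((N : Int) + 1).toNat = N + 1 := by omega
  rw [hL,
    PySem.List.pySetD_of_nonneg (List.replicate (N + 1) (0 : Int)) 1 (by norm_num : (0 : Int) ≤ 0),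
    Int.toNat_zero]
  apply List.ext_getElem
  · simp [pvD]
  · intro j h1 h2
    rw [List.getElem_set]
    simp only [pvD, List.getElem_map, List.getElem_range, List.getElem_replicate]
    rcases Nat.eq_zero_or_pos j with hj | hj
    · subst hj
      rw [if_pos rfl, if_pos (by omega)]
      norm_num [catalan_zero, pvP]
    · rw [if_neg (by omega), if_neg (by omega)]

lemma pvD_read (N t j : ℕ) (hj : j ≤ N) :
    PySem.List.pyGetD (pvD N t) (j : Int) 0 =
      if j % 2 = 0 ∧ j ≤ 2 * t then ((catalan (j / 2) % pvP : ℕ) : Int) else 0 := by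
  have hlen : j < (pvD N t).length := by rw [pvD_length]; omega
  rw [PySem.List.pyGetD_natCast, List.getD_eq_getElem _ _ hlen]
  simp [pvD]

lemma pvInner (N t : ℕ) (hn : 2 + 2 * t ≤ N) : ∀ u, u ≤ t + 1 →
    ((List.range u).map (fun s => ((1 + 2 * s : ℕ) : Int))).foldl
      (fun dp i =>
        PySem.List.pySetD dp ((2 + 2 * t : ℕ) : Int)
          (PySem.Int.mod
            (PySem.List.pyGetD dp ((2 + 2 * t : ℕ) : Int) 0 +
              PySem.List.pyGetD dp (i - 1) 0 * PySem.List.pyGetD dp (((2 + 2 * t : ℕ) : Int) - i - 1) 0)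
            (10 ^ 9 + 7)))
      (pvD N t)
    = (pvD N t).set (2 + 2 * t)
        ((((∑ s ∈ Finset.range u, catalan s * catalan (t - s)) % pvP : ℕ)) : Int) := by
  intro u hu
  induction u with
  | zero =>
    simp only [List.range_zero, List.map_nil, List.foldl_nil, Finset.range_zero,
      Finset.sum_empty, Nat.zero_mod, Nat.cast_zero]
    have hidx : 2 + 2 * t < (pvD N t).length := by rw [pvD_length]; omega
    have hval : (pvD N t)[2 + 2 * t] = 0 := by
      simp only [pvD, List.getElem_map, List.getElem_range]
      rw [if_neg (by omega)]
    conv_rhs => rw [← hval]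
    exact (List.set_getElem_self hidx).symm
  | succ u ih =>
    rw [List.range_succ, List.map_append, List.foldl_append, ih (by omega)]
    simp only [List.map_cons, List.map_nil, List.foldl_cons, List.foldl_nil]
    have hlen : (2 + 2 * t) <
        ((pvD N t).set (2 + 2 * t)
          (((∑ s ∈ Finset.range u, catalan s * catalan (t - s)) % pvP : ℕ) : Int)).length := by
      rw [List.length_set, pvD_length]; omega
    have hreadn : PySem.List.pyGetD
        ((pvD N t).set (2 + 2 * t)
          (((∑ s ∈ Finset.range u, catalan s * catalan (t - s)) % pvP : ℕ) : Int))
        ((2 + 2 * t : ℕ) : Int) 0 =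
        (((∑ s ∈ Finset.range u, catalan s * catalan (t - s)) % pvP : ℕ) : Int) := by
      rw [PySem.List.pyGetD_natCast, List.getD_eq_getElem _ _ hlen]
      exact List.getElem_set_self hlen
    have hread : ∀ j : ℕ, j ≤ 2 * t → PySem.List.pyGetD
        ((pvD N t).set (2 + 2 * t)
          (((∑ s ∈ Finset.range u, catalan s * catalan (t - s)) % pvP : ℕ) : Int))
        (j : Int) 0 =
        if j % 2 = 0 then ((catalan (j / 2) % pvP : ℕ) : Int) else 0 := by
      intro j hj
      rw [PySem.List.pyGetD_natCast,
        List.getD_eq_getElem _ _ (by rw [List.length_set, pvD_length]; omega),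
        List.getElem_set_ne (by omega)]
      simp only [pvD, List.getElem_map, List.getElem_range]
      by_cases he : j % 2 = 0
      · rw [if_pos ⟨he, hj⟩, if_pos he]
      · rw [if_neg (by tauto), if_neg he]
    have e1 : ((1 + 2 * u : ℕ) : Int) - 1 = ((2 * u : ℕ) : Int) := by push_cast; ring
    have e2 : ((2 + 2 * t : ℕ) : Int) - ((1 + 2 * u : ℕ) : Int) - 1 = ((2 * (t - u) : ℕ) : Int) := by
      push_cast; omega
    rw [hreadn, e1, e2, hread (2 * u) (by omega), hread (2 * (t - u)) (by omega),
      if_pos (by omega), if_pos (by omega),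
      show (2 * u) / 2 = u from by omega, show (2 * (t - u)) / 2 = t - u from by omega]
    rw [pvModCast,
      show (((∑ s ∈ Finset.range u, catalan s * catalan (t - s)) % pvP : ℕ) : Int) +
          ((catalan u % pvP : ℕ) : Int) * ((catalan (t - u) % pvP : ℕ) : Int) =
          (((∑ s ∈ Finset.range u, catalan s * catalan (t - s)) % pvP +
            (catalan u % pvP) * (catalan (t - u) % pvP) : ℕ) : Int) from by push_cast; ring,
      PySem.Int.mod_natCast]
    have hm : ((∑ s ∈ Finset.range u, catalan s * catalan (t - s)) % pvP +
          (catalan u % pvP) * (catalan (t - u) % pvP)) % pvP =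
        (∑ s ∈ Finset.range (u + 1), catalan s * catalan (t - s)) % pvP := by
      rw [Finset.sum_range_succ]
      exact Nat.ModEq.add (Nat.mod_modEq _ _) ((Nat.mod_modEq _ _).mul (Nat.mod_modEq _ _))
    rw [hm, PySem.List.pySetD_natCast, List.set_set]

lemma pvCat_sum (t : ℕ) : ∑ s ∈ Finset.range (t + 1), catalan s * catalan (t - s) = catalan (t + 1) := by
  rw [catalan_succ t]
  exact (Fin.sum_univ_eq_sum_range (fun i => catalan i * catalan (t - i)) (t + 1)).symm

lemma pvD_set (N v : ℕ) (_h : 2 + 2 * v ≤ N) :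
    (pvD N v).set (2 + 2 * v) ((catalan (v + 1) % pvP : ℕ) : Int) = pvD N (v + 1) := by
  apply List.ext_getElem
  · simp [pvD]
  · intro j h1 h2
    rw [List.getElem_set]
    simp only [pvD, List.getElem_map, List.getElem_range]
    by_cases hj : 2 + 2 * v = j
    · rw [if_pos hj, if_pos (by omega)]
      rw [show j / 2 = v + 1 from by omega]
    · rw [if_neg hj]
      by_cases he : j % 2 = 0 ∧ j ≤ 2 * v
      · rw [if_pos he, if_pos ⟨he.1, by omega⟩]
      · rw [if_neg he, if_neg (by rintro ⟨ha, hb⟩; exact he ⟨ha, by omega⟩)]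

lemma pvOuter (N : ℕ) : ∀ v, v ≤ N / 2 →
    ((List.range v).map (fun k => ((2 + 2 * k : ℕ) : Int))).foldl
      (fun dp n =>
        (PySem.List.pyRange 1 n 2).foldl
          (fun dp i =>
            PySem.List.pySetD dp n
              (PySem.Int.mod
                (PySem.List.pyGetD dp n 0 +
                  PySem.List.pyGetD dp (i - 1) 0 * PySem.List.pyGetD dp (n - i - 1) 0)
                (10 ^ 9 + 7)))
          dp)
      (pvD N 0)
    = pvD N v := by
  intro v
  induction v with
  | zero => intro _; simp
  | succ v ih =>
    intro hv
    rw [List.range_succ, List.map_append, List.foldl_append, ih (by omega)]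
    simp only [List.map_cons, List.map_nil, List.foldl_cons, List.foldl_nil]
    rw [pvInnerRange v]
    have h2 : 2 + 2 * v ≤ N := by omega
    rw [pvInner N v h2 (v + 1) le_rfl, pvCat_sum v, pvD_set N v h2]

lemma pvA_val (m : ℕ) :
    numberOfWays_2 (m : Int) =
      if m % 2 = 0 then ((catalan (m / 2) % pvP : ℕ) : Int) else 0 := by
  simp only [numberOfWays_2]
  rw [pvInit m, pvOuterRange m, pvOuter m (m / 2) le_rfl, pvD_read m (m / 2) m le_rfl]
  by_cases h : m % 2 = 0
  · rw [if_pos ⟨h, by omega⟩, if_pos h]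
  · rw [if_neg (by rintro ⟨h1, _⟩; exact h h1), if_neg h]

-- ===== VERDICT (by name: the statement is the Claim_ definition above) =====
theorem numberOfWays_2_spec : Claim_equal_numberOfWays_2 := by
  intro numPeople _ hpre
  unfold Spec_numberOfWays_2
  lift numPeople to ℕ using hpre with m
  rw [pvA_val m]
  rcases Nat.mod_two_eq_zero_or_one m with h | h
  · rw [if_pos h, pvB_even m h]
  · rw [if_neg (by omega), pvB_odd m h]
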